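-- pv_equiv track=rewrite | github.com/ahvShiro/wordle-checker | main.py | processar_restricoes
-- ===== SOURCE A (Python) =====
-- def processar_restricoes(palavra: str, status: str):
--     # Change from 'list' to 'str' since you're passing strings, not lists
--     letras_proibidas = set()
--     posicoes_erradas = {}
--     posicoes_certas = {}
--
--     for posicao in range(len(palavra)):
--         letra = palavra[posicao]
--         status_letra = status[posicao]
--
--         match status_letra:
--             case "0":
--                 letras_proibidas.add(letra)
--
--             case "1":
--                 if letra not in posicoes_erradas:
--                     posicoes_erradas[letra] = set()
--                 posicoes_erradas[letra].add(posicao)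
--
--             case "2":
--                 posicoes_certas[posicao] = letra
--
--     return letras_proibidas, posicoes_erradas, posicoes_certas
-- ===== SOURCE B (Python) =====
-- def processar_restricoes(palavra: str, status: str):
--     n = len(palavra)
--     letras_proibidas = {palavra[i] for i in range(n) if status[i] == "0"}
--     posicoes_certas = {i: palavra[i] for i in range(n) if status[i] == "2"}
--     uns = [i for i in range(n) if status[i] == "1"]
--     posicoes_erradas = {}
--     for i in uns:
--         letra = palavra[i]
--         if letra not in posicoes_erradas:
--             posicoes_erradas[letra] = {j for j in uns if palavra[j] == letra}
--     return letras_proibidas, posicoes_erradas, posicoes_certas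
-- ===== Notes on version B (the rewrite author's own statement) =====
-- stated objective: alternative
-- what changed: The single loop with a three-way match building all three structures at once is replaced by three separate filtered passes: a set comprehension for forbidden letters, a dict comprehension for correct positions, and a group-by-letter pass over the pre-filtered '1'-indices that builds each letter's full position set at its first occurrence.
import Mathlib
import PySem

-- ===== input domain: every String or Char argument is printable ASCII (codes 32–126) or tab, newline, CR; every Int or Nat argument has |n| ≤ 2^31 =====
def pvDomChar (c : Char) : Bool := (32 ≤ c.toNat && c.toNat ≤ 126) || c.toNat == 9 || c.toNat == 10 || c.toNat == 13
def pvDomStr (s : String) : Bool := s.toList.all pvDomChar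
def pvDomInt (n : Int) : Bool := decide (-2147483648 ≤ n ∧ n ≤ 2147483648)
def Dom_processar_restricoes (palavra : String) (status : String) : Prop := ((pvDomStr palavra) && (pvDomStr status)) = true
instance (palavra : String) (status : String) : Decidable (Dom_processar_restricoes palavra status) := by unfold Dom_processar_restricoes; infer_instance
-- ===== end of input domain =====

-- B replaces A's single loop+match by three separate filtered passes (set comprehension,
-- dict comprehension, and a group-by-letter pass over the pre-filtered '1'-indices); alternative decomposition, same results.


-- ===== PORT A =====
-- A's loop step over the triple state (letras_proibidas, posicoes_erradas, posicoes_certas);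
-- indexing uses pyGetD (in range for every input admitted by Pre_).
def pvStepA (cs ss : List Char)
    (st : PySem.Set String × PySem.Dict String (PySem.Set Int) × PySem.Dict Int String)
    (pos : Int) :
    PySem.Set String × PySem.Dict String (PySem.Set Int) × PySem.Dict Int String :=
  let letra : String := String.ofList [PySem.List.pyGetD cs pos ' ']
  let status_letra : Char := PySem.List.pyGetD ss pos ' '
  if status_letra = '0' then
    (PySem.Set.add st.1 letra, st.2.1, st.2.2)
  else if status_letra = '1' then
    let pe := if st.2.1.contains letra then st.2.1
              else st.2.1.insert letra (PySem.Set.empty : PySem.Set Int)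
    (st.1, pe.modify letra PySem.Set.empty (fun s => PySem.Set.add s pos), st.2.2)
  else if status_letra = '2' then
    (st.1, st.2.1, st.2.2.insert pos letra)
  else st

def processar_restricoes (palavra : String) (status : String) :
    List String × (List (String × List Int)) × (List (Int × String)) :=
  let cs := palavra.toList
  let ss := status.toList
  let fin := (PySem.List.pyRange 0 (PySem.List.len cs) 1).foldl (pvStepA cs ss)
      ((PySem.Set.empty : PySem.Set String),
       (PySem.Dict.empty : PySem.Dict String (PySem.Set Int)),
       (PySem.Dict.empty : PySem.Dict Int String))
  (fin.1, fin.2.1.items, fin.2.2.items)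

-- ===== PORT B =====
def processar_restricoes_alt (palavra : String) (status : String) :
    List String × (List (String × List Int)) × (List (Int × String)) :=
  let cs := palavra.toList
  let ss := status.toList
  let n := PySem.List.len cs
  -- letras_proibidas = {palavra[i] for i in range(n) if status[i] == "0"}
  let letras_proibidas : PySem.Set String :=
    PySem.Set.ofList (((PySem.List.pyRange 0 n 1).filter
        (fun i => PySem.List.pyGetD ss i ' ' == '0')).map
      (fun i => String.ofList [PySem.List.pyGetD cs i ' ']))
  -- posicoes_certas = {i: palavra[i] for i in range(n) if status[i] == "2"}
  let posicoes_certas : PySem.Dict Int String :=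
    ((PySem.List.pyRange 0 n 1).filter
        (fun i => PySem.List.pyGetD ss i ' ' == '2')).foldl
      (fun d i => d.insert i (String.ofList [PySem.List.pyGetD cs i ' '])) PySem.Dict.empty
  -- uns = [i for i in range(n) if status[i] == "1"]
  let uns : List Int :=
    (PySem.List.pyRange 0 n 1).filter (fun i => PySem.List.pyGetD ss i ' ' == '1')
  -- group the '1'-indices by letter: full position set at first occurrence
  let posicoes_erradas : PySem.Dict String (PySem.Set Int) :=
    uns.foldl
      (fun d i =>
        let letra : String := String.ofList [PySem.List.pyGetD cs i ' ']
        if d.contains letra then d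
        else d.insert letra
          (PySem.Set.ofList (uns.filter
            (fun j => String.ofList [PySem.List.pyGetD cs j ' '] == letra))))
      PySem.Dict.empty
  (letras_proibidas, posicoes_erradas.items, posicoes_certas.items)

-- ===== PRECONDITION & SPEC =====
-- Pre_ excludes exactly the inputs where Python A raises IndexError: status shorter than palavra.
def Pre_processar_restricoes (palavra : String) (status : String) : Prop :=
  palavra.toList.length ≤ status.toList.length
instance (palavra : String) (status : String) : Decidable (Pre_processar_restricoes palavra status) := by unfold Pre_processar_restricoes; infer_instance
def pvWitness_processar_restricoes : String × String := ("bolo", "0102")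

def Spec_processar_restricoes (palavra : String) (status : String) (out : List String × (List (String × List Int)) × (List (Int × String))) : Prop := out = processar_restricoes_alt palavra status
instance (palavra : String) (status : String) (out : List String × (List (String × List Int)) × (List (Int × String))) : Decidable (Spec_processar_restricoes palavra status out) := by unfold Spec_processar_restricoes; infer_instance

-- ===== CLAIM (what is proved, stated in full; the proofs are below) =====
def Claim_equal_processar_restricoes : Prop := ∀ (palavra : String) (status : String), Dom_processar_restricoes palavra status → Pre_processar_restricoes palavra status → Spec_processar_restricoes palavra status (processar_restricoes palavra status)

-- ===== LEMMAS AND PROOFS =====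
-- abbreviations used by the proofs
def pvK (cs : List Char) (i : Int) : String := String.ofList [PySem.List.pyGetD cs i ' ']
def pvS (ss : List Char) (i : Int) : Char := PySem.List.pyGetD ss i ' '

def pvStepPE (cs : List Char) (d : PySem.Dict String (PySem.Set Int)) (i : Int) :
    PySem.Dict String (PySem.Set Int) :=
  (if d.contains (pvK cs i) then d else d.insert (pvK cs i) PySem.Set.empty).modify
    (pvK cs i) PySem.Set.empty (fun s => PySem.Set.add s i)

lemma pvStepA_comps (cs ss : List Char)
    (st : PySem.Set String × PySem.Dict String (PySem.Set Int) × PySem.Dict Int String) (i : Int) :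
    pvStepA cs ss st i =
      ((if pvS ss i == '0' then PySem.Set.add st.1 (pvK cs i) else st.1),
       (if pvS ss i == '1' then pvStepPE cs st.2.1 i else st.2.1),
       (if pvS ss i == '2' then st.2.2.insert i (pvK cs i) else st.2.2)) := by
  simp only [pvStepA, pvStepPE, pvK, pvS, beq_iff_eq]
  split_ifs <;> simp_all

lemma pvFoldA_proj (cs ss : List Char) (l : List Int)
    (init : PySem.Set String × PySem.Dict String (PySem.Set Int) × PySem.Dict Int String) :
    l.foldl (pvStepA cs ss) init =
      (l.foldl (fun a i => if pvS ss i == '0' then PySem.Set.add a (pvK cs i) else a) init.1,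
       l.foldl (fun d i => if pvS ss i == '1' then pvStepPE cs d i else d) init.2.1,
       l.foldl (fun d i => if pvS ss i == '2' then d.insert i (pvK cs i) else d) init.2.2) := by
  induction l generalizing init with
  | nil => rfl
  | cons x t ih =>
    simp only [List.foldl_cons, ih, pvStepA_comps]

lemma pvIfAdd (f : Int → String) (p : Int → Bool) (l : List Int) :
    l.foldl (fun a i => if p i then PySem.Set.add a (f i) else a) (PySem.Set.empty : PySem.Set String)
      = PySem.Set.ofList ((l.filter p).map f) := by
  rw [← List.foldl_filter, ← PySem.Set.update_map_eq_foldl_add, PySem.Set.update_empty]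

lemma pvGroupB (k : Int → String) (v : String → PySem.Set Int) (u : List Int) :
    (u.foldl (fun d i => if d.contains (k i) then d else d.insert (k i) (v (k i)))
        (PySem.Dict.empty : PySem.Dict String (PySem.Set Int))).items
      = (PySem.Set.ofList (u.map k)).map (fun L => (L, v L)) := by
  induction u using List.reverseRecOn with
  | nil => rfl
  | append_singleton u x ih =>
    set D := u.foldl (fun d i => if d.contains (k i) then d else d.insert (k i) (v (k i)))
        (PySem.Dict.empty : PySem.Dict String (PySem.Set Int)) with hD
    have hcont : D.contains (k x) = decide (k x ∈ PySem.Set.ofList (u.map k)) := by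
      rw [PySem.Dict.contains_eq_decide_mem_keys]
      congr 1
      simp [PySem.Dict.keys, ih, List.map_map, Function.comp]
    simp only [List.foldl_append, List.foldl_cons, List.foldl_nil, ← hD]
    by_cases hc : k x ∈ PySem.Set.ofList (u.map k)
    · rw [if_pos (by rw [hcont]; simp [hc])]
      simp [ih, PySem.Set.ofList_append_singleton, PySem.Set.add_of_mem hc]
    · rw [if_neg (by rw [hcont]; simp [hc])]
      rw [PySem.Dict.items_insert_of_not_contains _ _ (by rw [hcont]; simp [hc])]
      simp [ih, PySem.Set.ofList_append_singleton, PySem.Set.add_of_not_mem hc]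

lemma pvGroupA (k : Int → String) (u : List Int) (hu : u.Pairwise (· < ·)) :
    (u.foldl (fun d i =>
        (if d.contains (k i) then d else d.insert (k i) (PySem.Set.empty : PySem.Set Int)).modify
          (k i) PySem.Set.empty (fun s => PySem.Set.add s i))
        (PySem.Dict.empty : PySem.Dict String (PySem.Set Int))).items
      = (PySem.Set.ofList (u.map k)).map (fun L => (L, u.filter (fun j => k j == L))) := by
  induction u using List.reverseRecOn with
  | nil => rfl
  | append_singleton u x ih =>
    rw [List.pairwise_append] at hu
    have hx : ∀ a ∈ u, a < x := fun a ha => hu.2.2 a ha x (by simp)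
    have hxu : x ∉ u := fun h => absurd (hx x h) (lt_irrefl x)
    have ih' := ih hu.1
    set D := u.foldl (fun d i =>
        (if d.contains (k i) then d else d.insert (k i) (PySem.Set.empty : PySem.Set Int)).modify
          (k i) PySem.Set.empty (fun s => PySem.Set.add s i))
        (PySem.Dict.empty : PySem.Dict String (PySem.Set Int)) with hD
    have hkeys : D.keys = PySem.Set.ofList (u.map k) := by
      simp [PySem.Dict.keys, ih', List.map_map, Function.comp_def]
    have hnd : D.keys.Nodup := by rw [hkeys]; exact PySem.Set.nodup_ofList _
    have hcont : D.contains (k x) = decide (k x ∈ PySem.Set.ofList (u.map k)) := by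
      rw [PySem.Dict.contains_eq_decide_mem_keys, hkeys]
    have hmod : ∀ (d : PySem.Dict String (PySem.Set Int)) (c : String)
        (f : PySem.Set Int → PySem.Set Int) (dflt : PySem.Set Int),
        d.modify c dflt f = d.insert c (f (d.getD c dflt)) := fun _ _ _ _ => rfl
    simp only [List.foldl_append, List.foldl_cons, List.foldl_nil, ← hD]
    by_cases hc : k x ∈ PySem.Set.ofList (u.map k)
    · rw [if_pos (by rw [hcont]; simp [hc]), hmod]
      have hmem : (k x, u.filter (fun j => k j == k x)) ∈ D.items := by
        rw [ih']; exact List.mem_map_of_mem hc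
      rw [PySem.Dict.getD_of_mem_items D hmem hnd]
      rw [PySem.Set.add_of_not_mem (fun hmm => hxu (List.mem_of_mem_filter hmm))]
      rw [PySem.Dict.items_insert_of_contains D _ (by rw [hcont]; simp [hc]), ih']
      have hofl : PySem.Set.ofList ((u ++ [x]).map k) = PySem.Set.ofList (u.map k) := by
        simp [PySem.Set.ofList_append_singleton, PySem.Set.add_of_mem hc]
      rw [hofl, List.map_map]
      apply List.map_congr_left
      intro L hL
      by_cases hLc : L = k x
      · subst hLc; simp [List.filter_append]
      · simp [List.filter_append, fun h => hLc (by simpa using h), Ne.symm hLc]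
    · rw [if_neg (by rw [hcont]; simp [hc]), hmod, PySem.Dict.getD_insert_self,
        (show (PySem.Set.empty : PySem.Set Int).add x = [x] from rfl), PySem.Dict.insert_insert_self,
        PySem.Dict.items_insert_of_not_contains D _ (by rw [hcont]; simp [hc]), ih']
      have hofl : PySem.Set.ofList ((u ++ [x]).map k) = PySem.Set.ofList (u.map k) ++ [k x] := by
        simp [PySem.Set.ofList_append_singleton, PySem.Set.add_of_not_mem hc]
      rw [hofl, List.map_append]
      have hfe : u.filter (fun j => k j == k x) = [] := by
        rw [List.filter_eq_nil_iff]
        intro j hj hkj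
        exact hc ((PySem.Set.mem_ofList _ _).2 (by rw [← (beq_iff_eq).1 hkj]; exact List.mem_map_of_mem hj))
      congr 1
      · apply List.map_congr_left
        intro L hL
        have hLne : L ≠ k x := fun h => hc (h ▸ hL)
        simp [List.filter_append, Ne.symm hLne]
      · simp [List.filter_append, hfe]

lemma pvUnsPairwise (ss : List Char) (n : Int) :
    ((PySem.List.pyRange 0 n 1).filter (fun i => PySem.List.pyGetD ss i ' ' == '1')).Pairwise (· < ·) :=
  List.Pairwise.sublist List.filter_sublist (PySem.List.pairwise_lt_pyRange_one 0 n)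

lemma pvUnsNodup (ss : List Char) (n : Int) :
    ((PySem.List.pyRange 0 n 1).filter (fun i => PySem.List.pyGetD ss i ' ' == '1')).Nodup :=
  (PySem.List.nodup_pyRange_one 0 n).filter _

-- ===== VERDICT (by name: the statement is the Claim_ definition above) =====
theorem processar_restricoes_spec : Claim_equal_processar_restricoes := by
  intro palavra status _ _
  simp only [Spec_processar_restricoes, processar_restricoes, processar_restricoes_alt]
  set cs := palavra.toList
  set ss := status.toList
  rw [pvFoldA_proj]
  simp only [pvK, pvS, pvStepPE, Prod.mk.injEq]
  refine ⟨?_, ?_, ?_⟩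
  · -- letras_proibidas
    rw [pvIfAdd (fun i => String.ofList [PySem.List.pyGetD cs i ' '])
      (fun i => PySem.List.pyGetD ss i ' ' == '0')]
  · -- posicoes_erradas
    rw [← List.foldl_filter]
    rw [pvGroupA (fun i => String.ofList [PySem.List.pyGetD cs i ' ']) _ (pvUnsPairwise ss _)]
    rw [pvGroupB (fun i => String.ofList [PySem.List.pyGetD cs i ' '])
      (fun L => PySem.Set.ofList
        (((PySem.List.pyRange 0 (PySem.List.len cs) 1).filter
            (fun i => PySem.List.pyGetD ss i ' ' == '1')).filter
          (fun j => String.ofList [PySem.List.pyGetD cs j ' '] == L)))]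
    apply List.map_congr_left
    intro L hL
    rw [PySem.Set.ofList_eq_self_of_nodup _ ((pvUnsNodup ss _).filter _)]
  · -- posicoes_certas
    rw [← List.foldl_filter]
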